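-- pv_equiv track=rewrite | github.com/cakelake1/Python-study | 1.3/9_task.py | TheRabbitsFoot
-- ===== SOURCE A (Python) =====
-- import math
--
-- def TheRabbitsFoot(s, encode):
--     while encode is True:
--         s_no_space = s.replace(" ", "")
--         N = len(s_no_space)
--         matrix_row = math.isqrt(N)
--         matrix_col = math.ceil(math.sqrt(N))
--         while matrix_row * matrix_col < N:
--             matrix_row += 1
--         encryption_columns = []
--         for j in range(matrix_col):
--             col = []
--             for i in range(matrix_row):
--                 index = i * matrix_col + j
--                 if index < N:
--                     col.append(s_no_space[index])
--             encryption_columns.append(''.join(col))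
--         return ' '.join(encryption_columns)
--     while encode is False:
--         groups = s.split()
--         matrix_col = len(groups)
--         matrix_row = max(len(group) for group in groups)
--         decription_list = []
--         for i in range(matrix_row):
--             for j in range(matrix_col):
--                 if i < len(groups[j]):
--                     decription_list.append(groups[j][i])
--         return ''.join(decription_list)
-- ===== SOURCE B (Python) =====
-- import math
--
-- def TheRabbitsFoot(s, encode):
--     if encode is True:
--         # single pass: char k of the de-spaced text belongs to column k % c
--         t = s.replace(" ", "")
--         n = len(t)
--         c = math.isqrt(n)
--         if c * c < n:
--             c += 1
--         cols = [[] for _ in range(c)]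
--         for k, ch in enumerate(t):
--             cols[k % c].append(ch)
--         return ' '.join(''.join(col) for col in cols)
--     if encode is False:
--         # peel the first character off every group, round by round
--         groups = s.split()
--         out = []
--         while groups:
--             out.extend(g[0] for g in groups)
--             groups = [g[1:] for g in groups if len(g) > 1]
--         return ''.join(out)
-- ===== Notes on version B (the rewrite author's own statement) =====
-- stated objective: simpler
-- what changed: Encode replaces the nested column-by-column index scan (i*col+j for every cell) by a single round-robin pass that drops char k into column k%c; decode replaces the row/column double loop over max-length with a peeling loop that repeatedly takes the first character of every group and drops the consumed heads.
import Mathlib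
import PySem

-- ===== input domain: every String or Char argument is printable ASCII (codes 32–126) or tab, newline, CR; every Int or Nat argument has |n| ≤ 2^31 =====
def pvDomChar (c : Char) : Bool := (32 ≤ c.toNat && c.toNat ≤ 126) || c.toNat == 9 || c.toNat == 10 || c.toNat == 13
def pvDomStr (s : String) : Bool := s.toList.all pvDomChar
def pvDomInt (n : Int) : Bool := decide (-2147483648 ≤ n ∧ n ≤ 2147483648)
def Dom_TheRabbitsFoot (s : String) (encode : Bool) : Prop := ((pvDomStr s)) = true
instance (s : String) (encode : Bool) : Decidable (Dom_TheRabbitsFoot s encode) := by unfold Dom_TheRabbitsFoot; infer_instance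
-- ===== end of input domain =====

-- Columnar ("rabbit's foot") grid cipher: A fills/reads the grid with nested index loops;
-- B encodes by round-robin distribution of chars into columns and decodes by peeling group heads.


-- ===== PORT A =====
-- 'while matrix_row * matrix_col < N: matrix_row += 1'; fuel n suffices (col ≥ 1 whenever n ≥ 1)
def pvRowAdjust : Nat → Nat → Nat → Nat → Nat
  | 0, row, _, _ => row
  | fuel+1, row, col, n => if row * col < n then pvRowAdjust fuel (row+1) col n else row

-- math.ceil(math.sqrt N), in exact integer form (float sqrt is exact at these sizes)
def pvCeilSqrt (n : Nat) : Nat :=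
  let r := Nat.sqrt n
  if r * r == n then r else r + 1

def TheRabbitsFoot (s : String) (encode : Bool) : String :=
  if encode then
    let cs := PySem.Chars.replace s.toList [' '] []
    let n := cs.length
    let matrixCol := pvCeilSqrt n
    let matrixRow := pvRowAdjust n (Nat.sqrt n) matrixCol n
    let encryptionColumns := (List.range matrixCol).foldl (fun acc j =>
      acc ++ [(List.range matrixRow).foldl (fun col i =>
        let index := i * matrixCol + j
        if index < n then col ++ [cs.getD index ' '] else col) []]) []
    String.ofList (PySem.Chars.join [' '] encryptionColumns)
  else
    let groups := PySem.Chars.split₀ s.toList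
    let matrixCol := groups.length
    -- max(len(group) for group in groups): Python raises on empty groups (excluded by Pre_)
    let matrixRow := groups.foldl (fun m g => max m g.length) 0
    let decriptionList := (List.range matrixRow).foldl (fun acc i =>
      (List.range matrixCol).foldl (fun acc2 j =>
        let g := groups.getD j []
        if i < g.length then acc2 ++ [g.getD i ' '] else acc2) acc) []
    String.ofList decriptionList

-- ===== PORT B =====
-- decode: 'while groups:' — take the head of every group, then recurse on the beheaded
-- non-exhausted groups; fuel only makes the recursion structural (sum of lengths + 1 suffices:
-- the round count is the maximal group length, which is at most the sum)
def pvPeel : Nat → List (List Char) → List Char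
  | _, [] => []
  | 0, _ :: _ => []
  | fuel+1, g :: gs =>
      (g :: gs).filterMap List.head? ++
      pvPeel fuel (((g :: gs).filter (fun x => decide (1 < x.length))).map (List.drop 1))

def TheRabbitsFoot_alt (s : String) (encode : Bool) : String :=
  if encode then
    let cs := PySem.Chars.replace s.toList [' '] []
    let n := cs.length
    let r := Nat.sqrt n
    let c := if r * r < n then r + 1 else r
    let cols := cs.zipIdx.foldl (fun cols p => cols.modify (p.2 % c) (· ++ [p.1]))
      ((List.range c).map (fun _ => []))
    String.ofList (PySem.Chars.join [' '] cols)
  else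
    let groups := PySem.Chars.split₀ s.toList
    String.ofList (pvPeel ((groups.map List.length).sum + 1) groups)

-- ===== PRECONDITION & SPEC =====
-- Pre_ excludes only decode calls whose input splits into no groups: there A's max() raises ValueError.
def Pre_TheRabbitsFoot (s : String) (encode : Bool) : Prop :=
  encode = true ∨ PySem.Chars.split₀ s.toList ≠ []
instance (s : String) (encode : Bool) : Decidable (Pre_TheRabbitsFoot s encode) := by
  unfold Pre_TheRabbitsFoot; infer_instance
def pvWitness_TheRabbitsFoot : String × Bool := ("ab cd", false)

def Spec_TheRabbitsFoot (s : String) (encode : Bool) (out : String) : Prop := out = TheRabbitsFoot_alt s encode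
instance (s : String) (encode : Bool) (out : String) : Decidable (Spec_TheRabbitsFoot s encode out) := by unfold Spec_TheRabbitsFoot; infer_instance

-- ===== CLAIM (what is proved, stated in full; the proofs are below) =====
def Claim_equal_TheRabbitsFoot : Prop := ∀ (s : String) (encode : Bool), Dom_TheRabbitsFoot s encode → Pre_TheRabbitsFoot s encode → Spec_TheRabbitsFoot s encode (TheRabbitsFoot s encode)
-- ===== LEMMAS AND PROOFS =====

-- ---- encode side ----

-- the adjusted row count covers the text: matrix_row * matrix_col ≥ N
theorem pvRowAdjust_ge : ∀ (fuel row c n : Nat), n ≤ row + fuel → 1 ≤ c →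
    n ≤ pvRowAdjust fuel row c n * c
  | 0, row, c, n, h, hc => by
    simp only [pvRowAdjust]
    calc n ≤ row := by omega
      _ = row * 1 := by ring
      _ ≤ row * c := Nat.mul_le_mul_left row hc
  | fuel+1, row, c, n, h, hc => by
    simp only [pvRowAdjust]
    split
    · exact pvRowAdjust_ge fuel (row+1) c n (by omega) hc
    · omega

-- A's ceil(sqrt N) equals B's "isqrt, bump if not a square"
theorem pvCeilSqrt_eq (n : Nat) :
    pvCeilSqrt n = if Nat.sqrt n * Nat.sqrt n < n then Nat.sqrt n + 1 else Nat.sqrt n := by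
  have h := Nat.sqrt_le n
  unfold pvCeilSqrt
  by_cases he : Nat.sqrt n * Nat.sqrt n = n
  · simp [he]
  · have hlt : Nat.sqrt n * Nat.sqrt n < n := by omega
    simp [he, hlt]

-- the indices < n congruent to j (mod c), in order, are exactly i*c+j for the admitted rows i
theorem pvStride (n c j mrow : Nat) (hj : j < c) (hn : n ≤ mrow * c) :
    (List.range n).filter (fun k => k % c == j)
      = ((List.range mrow).filter (fun i => decide (i * c + j < n))).map (fun i => i * c + j) := by
  have hc : 0 < c := by omega
  have hL : ((List.range n).filter (fun k => k % c == j)).Pairwise (· < ·) :=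
    List.Pairwise.filter _ (List.pairwise_lt_range)
  have hR : (((List.range mrow).filter (fun i => decide (i * c + j < n))).map (fun i => i * c + j)).Pairwise (· < ·) := by
    refine List.Pairwise.map _ (fun a b hab => ?_) (List.Pairwise.filter _ (List.pairwise_lt_range))
    exact Nat.add_lt_add_right ((Nat.mul_lt_mul_right hc).mpr hab) j
  have hmem : ∀ k, (k ∈ (List.range n).filter (fun k => k % c == j)) ↔
      k ∈ ((List.range mrow).filter (fun i => decide (i * c + j < n))).map (fun i => i * c + j) := by
    intro k
    simp only [List.mem_filter, List.mem_range, List.mem_map, beq_iff_eq, decide_eq_true_eq]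
    constructor
    · rintro ⟨hk, hmod⟩
      have hdm := Nat.div_add_mod k c
      refine ⟨k / c, ⟨?_, ?_⟩, ?_⟩
      · have h1 : k / c * c + j = k := by rw [Nat.mul_comm]; omega
        have h2 : k / c * c < mrow * c := by omega
        exact Nat.lt_of_mul_lt_mul_right h2
      · have h1 : k / c * c + j = k := by rw [Nat.mul_comm]; omega
        omega
      · rw [Nat.mul_comm]; omega
    · rintro ⟨i, ⟨hi, hlt⟩, rfl⟩
      refine ⟨hlt, ?_⟩
      rw [Nat.add_comm, Nat.add_mul_mod_self_right]
      exact Nat.mod_eq_of_lt hj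
  have hperm := (List.perm_ext_iff_of_nodup
      (hL.imp (fun h => Nat.ne_of_lt h)) (hR.imp (fun h => Nat.ne_of_lt h))).mpr hmem
  exact List.eq_of_perm_of_sorted (fun a b _ _ h1 h2 => Nat.le_antisymm h1 h2)
    (hL.imp Nat.le_of_lt) (hR.imp Nat.le_of_lt) hperm

-- modifying one slot of a range-tabulated list re-tabulates it
theorem pvModifyMapRange {α : Type} (c t : Nat) (f : α → α) (g : Nat → α) :
    ((List.range c).map g).modify t f
      = (List.range c).map (fun j => if t = j then f (g j) else g j) := by
  apply List.ext_getElem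
  · simp
  · intro i h1 h2
    simp only [List.length_modify, List.length_map, List.length_range] at h1
    simp [List.getElem_modify]

-- B's round-robin distribution tabulates the mod-c residue classes, in index order
theorem pvCols (c : Nat) (hc : 0 < c) (cs : List Char) :
    cs.zipIdx.foldl (fun cols p => cols.modify (p.2 % c) (· ++ [p.1]))
        ((List.range c).map (fun _ => ([] : List Char)))
      = (List.range c).map (fun j =>
          ((List.range cs.length).filter (fun k => k % c == j)).map (fun k => cs.getD k ' ')) := by
  induction cs using List.reverseRecOn with
  | nil => simp
  | append_singleton cs x ih =>
    rw [List.zipIdx_append, List.foldl_append]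
    simp only [List.zipIdx_cons, List.zipIdx_nil, Nat.zero_add, List.foldl_cons, List.foldl_nil]
    rw [ih, pvModifyMapRange]
    apply List.map_congr_left
    intro j hj
    rw [List.mem_range] at hj
    have hrange : List.range (cs ++ [x]).length = List.range cs.length ++ [cs.length] := by
      simp [List.range_succ]
    rw [hrange, List.filter_append, List.map_append]
    have hold : ((List.range cs.length).filter (fun k => k % c == j)).map (fun k => (cs ++ [x]).getD k ' ')
        = ((List.range cs.length).filter (fun k => k % c == j)).map (fun k => cs.getD k ' ') := by
      apply List.map_congr_left
      intro k hk
      have : k < cs.length := by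
        have := List.mem_range.mp (List.mem_of_mem_filter hk)
        exact this
      rw [List.getD_append _ _ _ _ this]
    rw [hold]
    by_cases hm : cs.length % c = j
    · rw [if_pos hm]
      have : (List.filter (fun k => k % c == j) [cs.length]) = [cs.length] := by
        simp [hm]
      rw [this]
      simp
    · rw [if_neg hm]
      have : (List.filter (fun k => k % c == j) [cs.length]) = [] := by
        simp [hm]
      rw [this]
      simp

set_option maxHeartbeats 1000000 in
theorem encode_eq (s : String) :
    TheRabbitsFoot s true = TheRabbitsFoot_alt s true := by
  simp only [TheRabbitsFoot, TheRabbitsFoot_alt, if_pos]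
  set cs := PySem.Chars.replace s.toList [' '] [] with hcs
  set n := cs.length with hn
  have hcol := pvCeilSqrt_eq n
  rcases Nat.eq_zero_or_pos n with h0 | hpos
  · -- empty de-spaced text: both sides join an empty column list
    have hcs0 : cs = [] := List.length_eq_zero_iff.mp h0
    simp [hcs0, h0, pvCeilSqrt]
  · -- c = matrixCol > 0
    have hsqpos : 0 < pvCeilSqrt n := by
      rw [hcol]
      split
      · omega
      · have := Nat.sqrt_pos.mpr hpos
        omega
    have hcov : n ≤ pvRowAdjust n (Nat.sqrt n) (pvCeilSqrt n) n * pvCeilSqrt n :=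
      pvRowAdjust_ge n (Nat.sqrt n) (pvCeilSqrt n) n (by omega) hsqpos
    rw [← hcol]
    congr 1
    -- outer fold on A's side is a map over columns
    have houter : ∀ (f : Nat → List Char),
        (List.range (pvCeilSqrt n)).foldl (fun acc j => acc ++ [f j]) [] = (List.range (pvCeilSqrt n)).map f :=
      fun f => by simpa using PySem.List.foldl_append_singleton_eq_map f (List.range (pvCeilSqrt n)) []
    rw [houter, pvCols _ hsqpos]
    congr 1
    apply List.map_congr_left
    intro j hj
    rw [List.mem_range] at hj
    have hinner : (List.range (pvRowAdjust n (Nat.sqrt n) (pvCeilSqrt n) n)).foldl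
        (fun col i => if i * pvCeilSqrt n + j < n then col ++ [cs.getD (i * pvCeilSqrt n + j) ' '] else col) []
        = ((List.range (pvRowAdjust n (Nat.sqrt n) (pvCeilSqrt n) n)).filter
            (fun i => decide (i * pvCeilSqrt n + j < n))).map (fun i => cs.getD (i * pvCeilSqrt n + j) ' ') := by
      simpa using PySem.List.foldl_append_if (fun i => decide (i * pvCeilSqrt n + j < n))
        (fun i => cs.getD (i * pvCeilSqrt n + j) ' ') (List.range (pvRowAdjust n (Nat.sqrt n) (pvCeilSqrt n) n)) []
    rw [hinner, pvStride n (pvCeilSqrt n) j _ hj hcov, List.map_map]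
    rfl

-- ---- decode side ----

-- the maximal group length (max(len(g) for g in groups), with 0 for no groups)
def pvMaxLen (gs : List (List Char)) : Nat := gs.foldr (fun g m => max g.length m) 0

theorem pvFoldlMax : ∀ (gs : List (List Char)) (a : Nat),
    gs.foldl (fun m g => max m g.length) a = max a (pvMaxLen gs)
  | [], a => by simp [pvMaxLen]
  | g :: gs, a => by
    simp only [List.foldl_cons, pvMaxLen, List.foldr_cons]
    rw [pvFoldlMax gs (max a g.length)]
    simp only [pvMaxLen]
    omega

-- one decode row of A: scanning all columns j and picking group[j][i] is filterMap over groups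
theorem pvRowPick : ∀ (gs : List (List Char)) (i : Nat),
    ((List.range gs.length).filter (fun j => decide (i < (gs.getD j []).length))).map
        (fun j => (gs.getD j []).getD i ' ')
      = gs.filterMap (fun g => g[i]?)
  | [], i => by simp
  | g :: gs, i => by
    have htail := pvRowPick gs i
    rw [List.length_cons, List.range_succ_eq_map, List.filter_cons]
    have hshift : ((List.map Nat.succ (List.range gs.length)).filter
          (fun j => decide (i < (((g :: gs).getD j []).length)))).map
            (fun j => ((g :: gs).getD j []).getD i ' ')
        = gs.filterMap (fun g => g[i]?) := by
      rw [List.filter_map, List.map_map, ← htail]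
      simp only [Function.comp_def, List.getD_cons_succ, Nat.succ_eq_add_one]
    by_cases hg : i < g.length
    · simp only [List.getD_cons_zero, hg, decide_true, if_true, List.map_cons, List.filterMap_cons,
        List.getElem?_eq_getElem hg]
      rw [hshift]
      congr 1
      exact List.getD_eq_getElem g ' ' hg
    · simp only [List.getD_cons_zero, hg, decide_false, Bool.false_eq_true, if_false,
        List.filterMap_cons, List.getElem?_eq_none (show g.length ≤ i by omega)]
      exact hshift

-- every group shrinks by one head per peeling round
theorem pvMaxLenPeel : ∀ gs : List (List Char),
    pvMaxLen ((gs.filter (fun x => decide (1 < x.length))).map (List.drop 1)) = pvMaxLen gs - 1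
  | [] => by simp [pvMaxLen]
  | g :: gs => by
    have ih := pvMaxLenPeel gs
    by_cases hg : 1 < g.length
    · simp only [List.filter_cons, hg, decide_true, if_true, List.map_cons, pvMaxLen,
        List.foldr_cons, List.length_drop] at ih ⊢
      rw [ih, Nat.sub_max_sub_right]
    · simp only [List.filter_cons, hg, decide_false, Bool.false_eq_true, if_false, pvMaxLen,
        List.foldr_cons] at ih ⊢
      rw [ih, ← Nat.sub_max_sub_right]
      have hlen : g.length - 1 = 0 := by omega
      rw [hlen, Nat.zero_max]

theorem pvMaxLenZero : ∀ gs : List (List Char), pvMaxLen gs = 0 → ∀ g ∈ gs, g = []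
  | [], _, g, hg => by simp at hg
  | x :: gs, h, g, hg => by
    simp only [pvMaxLen, List.foldr_cons] at h
    rcases List.mem_cons.mp hg with rfl | hmem
    · have : g.length = 0 := by omega
      exact List.length_eq_zero_iff.mp this
    · exact pvMaxLenZero gs (by simp only [pvMaxLen]; omega) g hmem

theorem pvMaxLenLeSum : ∀ gs : List (List Char), pvMaxLen gs ≤ (gs.map List.length).sum
  | [] => by simp [pvMaxLen]
  | g :: gs => by
    have ih := pvMaxLenLeSum gs
    simp only [pvMaxLen, List.foldr_cons, List.map_cons, List.sum_cons] at *
    omega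

-- a beheaded round reads row i+1 of the original groups
theorem pvRowPeel : ∀ (gs : List (List Char)) (i : Nat),
    gs.filterMap (fun g => g[i+1]?)
      = ((gs.filter (fun x => decide (1 < x.length))).map (List.drop 1)).filterMap (fun g => g[i]?)
  | [], i => by simp
  | g :: gs, i => by
    have ih := pvRowPeel gs i
    by_cases hg : 1 < g.length
    · simp only [List.filter_cons, hg, decide_true, if_true, List.map_cons, List.filterMap_cons]
      have : (g.drop 1)[i]? = g[1 + i]? := List.getElem?_drop
      rw [this, Nat.add_comm 1 i, ih]
    · simp only [List.filter_cons, hg, decide_false, Bool.false_eq_true, if_false, List.filterMap_cons]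
      have : g[i+1]? = none := List.getElem?_eq_none (by omega)
      rw [this, ih]

-- B's peeling loop produces A's row-major reading of the group grid
theorem pvPeel_eq : ∀ (fuel : Nat) (gs : List (List Char)), pvMaxLen gs < fuel →
    pvPeel fuel gs = (List.range (pvMaxLen gs)).flatMap (fun i => gs.filterMap (fun g => g[i]?))
  | 0, gs, h => by omega
  | fuel+1, [], _ => by simp [pvPeel, pvMaxLen]
  | fuel+1, g :: gs, h => by
    rw [pvPeel]
    rcases Nat.eq_zero_or_pos (pvMaxLen (g :: gs)) with h0 | hpos
    · have hall := pvMaxLenZero (g :: gs) h0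
      have hheads : (g :: gs).filterMap List.head? = [] := by
        rw [List.filterMap_eq_nil_iff]
        intro a ha
        rw [hall a ha]
        rfl
      have hpeel : ((g :: gs).filter (fun x => decide (1 < x.length))).map (List.drop 1) = [] := by
        rw [List.map_eq_nil_iff, List.filter_eq_nil_iff]
        intro a ha hlen
        rw [hall a ha] at hlen
        simp at hlen
      rw [hheads, hpeel, h0]
      simp [pvPeel]
    · obtain ⟨M, hM⟩ : ∃ M, pvMaxLen (g :: gs) = M + 1 := ⟨pvMaxLen (g :: gs) - 1, by omega⟩
      have hMpeel : pvMaxLen (((g :: gs).filter (fun x => decide (1 < x.length))).map (List.drop 1)) = M := by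
        rw [pvMaxLenPeel (g :: gs), hM]
        omega
      have hIH := pvPeel_eq fuel (((g :: gs).filter (fun x => decide (1 < x.length))).map (List.drop 1))
        (by rw [hMpeel]; omega)
      rw [hIH, hMpeel, hM, List.range_succ_eq_map, List.flatMap_cons]
      congr 1
      · apply List.filterMap_congr
        intro a _
        rw [List.head?_eq_getElem?]
      · rw [List.flatMap_map]
        apply List.flatMap_congr
        intro i _
        exact (pvRowPeel (g :: gs) i).symm

theorem decode_eq (s : String) (_h : PySem.Chars.split₀ s.toList ≠ []) :
    TheRabbitsFoot s false = TheRabbitsFoot_alt s false := by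
  simp only [TheRabbitsFoot, TheRabbitsFoot_alt, Bool.false_eq_true, if_false]
  set gs := PySem.Chars.split₀ s.toList with hgs
  have hmax : gs.foldl (fun m g => max m g.length) 0 = pvMaxLen gs := by
    rw [pvFoldlMax]; omega
  have hrow : ∀ (i : Nat) (acc : List Char),
      (List.range gs.length).foldl (fun acc2 j =>
        if i < (gs.getD j []).length then acc2 ++ [(gs.getD j []).getD i ' '] else acc2) acc
      = acc ++ gs.filterMap (fun g => g[i]?) := by
    intro i acc
    have := PySem.List.foldl_append_if (fun j => decide (i < (gs.getD j []).length))
      (fun j => (gs.getD j []).getD i ' ') (List.range gs.length) acc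
    simp only [decide_eq_true_eq] at this
    rw [this, pvRowPick]
  have houter : (List.range (pvMaxLen gs)).foldl (fun acc i =>
      (List.range gs.length).foldl (fun acc2 j =>
        if i < (gs.getD j []).length then acc2 ++ [(gs.getD j []).getD i ' '] else acc2) acc) []
      = (List.range (pvMaxLen gs)).flatMap (fun i => gs.filterMap (fun g => g[i]?)) := by
    have hfun : (fun (acc : List Char) (i : Nat) =>
        (List.range gs.length).foldl (fun acc2 j =>
          if i < (gs.getD j []).length then acc2 ++ [(gs.getD j []).getD i ' '] else acc2) acc)
        = fun acc i => acc ++ gs.filterMap (fun g => g[i]?) := by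
      funext acc i
      exact hrow i acc
    rw [hfun]
    simpa using PySem.List.foldl_append_eq_flatMap (fun i => gs.filterMap (fun g => g[i]?)) (List.range (pvMaxLen gs)) []
  rw [hmax, houter, pvPeel_eq ((gs.map List.length).sum + 1) gs (by have := pvMaxLenLeSum gs; omega)]

-- ===== VERDICT (by name: the statement is the Claim_ definition above) =====
theorem TheRabbitsFoot_spec : Claim_equal_TheRabbitsFoot := by
  intro s encode _ hpre
  unfold Spec_TheRabbitsFoot
  cases encode with
  | true => exact encode_eq s
  | false =>
    rcases hpre with h | h
    · exact absurd h (by simp)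
    · exact decode_eq s h
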